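-- pv_equiv track=rewrite | github.com/acrotron/aye-chat | src/aye/presenter/streaming_ui.py | _tail_content
-- ===== SOURCE A (Python) =====
-- from typing import Optional, Callable, Tuple, Any
--
-- def _tail_content(content: str, width: int, max_lines: int) -> Tuple[str, bool]:
--     """Tail content to fit within *max_lines* when wrapped at *width*.
--
--     Estimates the number of terminal rows each raw line would occupy
--     after wrapping and keeps only the last lines that fit.
--
--     Args:
--         content: The raw streaming content.
--         width: Available inner width in terminal columns.
--         max_lines: Maximum number of wrapped terminal lines to keep.
--
--     Returns:
--         ``(tailed_content, is_truncated)`` where *is_truncated* is True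
--         when content was shortened.
--     """
--     if not content or max_lines <= 0 or width <= 0:
--         return (content, False)
--
--     raw_lines = content.split("\n")
--
--     def _wrapped_height(line: str) -> int:
--         if not line:
--             return 1
--         return max(1, -(-len(line) // width))  # ceiling division
--
--     line_heights = [_wrapped_height(line) for line in raw_lines]
--     total_height = sum(line_heights)
--
--     if total_height <= max_lines:
--         return (content, False)
--
--     accumulated = 0
--     start_index = len(raw_lines)
--     for i in range(len(raw_lines) - 1, -1, -1):
--         if accumulated + line_heights[i] > max_lines:
--             break
--         accumulated += line_heights[i]
--         start_index = i
--
--     if start_index >= len(raw_lines):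
--         start_index = len(raw_lines) - 1
--
--     tailed = "\n".join(raw_lines[start_index:])
--     return (tailed, True)
-- ===== SOURCE B (Python) =====
-- def _tail_content(content, width, max_lines):
--     """Tail content to fit within max_lines wrapped terminal lines.
--
--     Forward remainder walk: instead of accumulating suffix heights
--     backwards, keep a running total and peel leading lines off it
--     until the remaining suffix fits (or one line is left)."""
--     if not content or max_lines <= 0 or width <= 0:
--         return (content, False)
--
--     raw_lines = content.split("\n")
--
--     def _h(line):
--         return 1 if not line else max(1, -(-len(line) // width))
--
--     remaining = sum(_h(line) for line in raw_lines)
--     if remaining <= max_lines: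
--         return (content, False)
--
--     start = 0
--     while start < len(raw_lines) - 1 and remaining > max_lines:
--         remaining -= _h(raw_lines[start])
--         start += 1
--     return ("\n".join(raw_lines[start:]), True)
-- ===== Notes on version B (the rewrite author's own statement) =====
-- stated objective: alternative
-- what changed: Replaces the backward suffix-accumulation loop (plus start_index>=len fixup) and the materialized line_heights list with a forward remainder walk: start from the total height and peel leading line heights off until the remaining suffix fits or one line is left.
import Mathlib
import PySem

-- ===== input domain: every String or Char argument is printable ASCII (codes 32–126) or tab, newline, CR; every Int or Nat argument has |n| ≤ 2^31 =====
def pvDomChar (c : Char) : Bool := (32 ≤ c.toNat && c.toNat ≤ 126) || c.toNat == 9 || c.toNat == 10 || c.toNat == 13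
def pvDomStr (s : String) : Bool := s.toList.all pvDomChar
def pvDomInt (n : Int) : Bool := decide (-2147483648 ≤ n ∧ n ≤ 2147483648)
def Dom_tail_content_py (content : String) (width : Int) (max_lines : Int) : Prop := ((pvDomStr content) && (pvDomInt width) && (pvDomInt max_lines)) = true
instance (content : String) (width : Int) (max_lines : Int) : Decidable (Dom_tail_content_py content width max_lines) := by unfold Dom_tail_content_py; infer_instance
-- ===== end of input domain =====

-- B replaces A's backward suffix-accumulation loop (with its start_index fixup and the
-- materialized line_heights list) by a forward remainder walk off the total height;
-- same return value everywhere (objective: alternative decomposition, same O(n) cost).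

-- ===== PORT A =====
-- _wrapped_height (A's inner helper): 1 if not line else max(1, -(-len(line) // width))
def pvWrappedHeight (line : List Char) (width : Int) : Int :=
  if line = [] then 1
  else max 1 (-(PySem.Int.floordiv (-(line.length : Int)) width))

-- A's backward loop: for i in range(len-1, -1, -1), acc/start_index state, break on overflow
def pvAGo (hs : List Int) (maxL : Int) : Nat → Int → Nat → Nat
  | 0, _, start => start
  | k+1, acc, start =>
      if maxL < acc + PySem.List.pyGetD hs (k : Int) 0 then start
      else pvAGo hs maxL k (acc + PySem.List.pyGetD hs (k : Int) 0) k

def tail_content_py (content : String) (width : Int) (max_lines : Int) : String × Bool :=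
  if content = "" ∨ max_lines ≤ 0 ∨ width ≤ 0 then (content, false)
  else
    let raw_lines := PySem.Chars.splitOn content.toList ['\n']
    let line_heights := raw_lines.map (fun l => pvWrappedHeight l width)
    let total_height := line_heights.sum
    if total_height ≤ max_lines then (content, false)
    else
      let s0 := pvAGo line_heights max_lines raw_lines.length 0 raw_lines.length
      let start_index := if raw_lines.length ≤ s0 then raw_lines.length - 1 else s0
      (String.ofList (PySem.Chars.join ['\n']
        (PySem.List.slice raw_lines (some (start_index : Int)) none)), true)

-- ===== PORT B =====
-- B's inner helper _h: 1 if not line else max(1, -(-len(line) // width))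
def pvHeightB (line : List Char) (width : Int) : Int :=
  if line = [] then 1
  else max 1 (-(PySem.Int.floordiv (-(line.length : Int)) width))

-- B's forward remainder walk: while start < len(raw_lines)-1 and remaining > max_lines
def pvBGo (lines : List (List Char)) (width maxL : Int) (start : Nat) (remaining : Int) : Nat :=
  if h : (start : Int) < (lines.length : Int) - 1 ∧ maxL < remaining then
    pvBGo lines width maxL (start + 1)
      (remaining - pvHeightB (PySem.List.pyGetD lines (start : Int) []) width)
  else start
termination_by lines.length - start
decreasing_by omega

def tail_content_py_alt (content : String) (width : Int) (max_lines : Int) : String × Bool :=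
  if content = "" ∨ max_lines ≤ 0 ∨ width ≤ 0 then (content, false)
  else
    let raw_lines := PySem.Chars.splitOn content.toList ['\n']
    let remaining := (raw_lines.map (fun l => pvHeightB l width)).sum
    if remaining ≤ max_lines then (content, false)
    else
      let start := pvBGo raw_lines width max_lines 0 remaining
      (String.ofList (PySem.Chars.join ['\n']
        (PySem.List.slice raw_lines (some (start : Int)) none)), true)

-- ===== PRECONDITION & SPEC =====
def Spec_tail_content_py (content : String) (width : Int) (max_lines : Int) (out : String × Bool) : Prop := out = tail_content_py_alt content width max_lines
instance (content : String) (width : Int) (max_lines : Int) (out : String × Bool) : Decidable (Spec_tail_content_py content width max_lines out) := by unfold Spec_tail_content_py; infer_instance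

-- ===== CLAIM (what is proved, stated in full; the proofs are below) =====
def Claim_equal_tail_content_py : Prop := ∀ (content : String) (width : Int) (max_lines : Int), Dom_tail_content_py content width max_lines → Spec_tail_content_py content width max_lines (tail_content_py content width max_lines)

-- ===== LEMMAS AND PROOFS =====

-- suffix height: sum of hs[k:]
def pvS (hs : List Int) (k : Nat) : Int := (hs.drop k).sum

theorem pvHeightB_eq_pvWrappedHeight : pvHeightB = pvWrappedHeight := rfl

theorem pvWrappedHeight_pos (line : List Char) (width : Int) :
    (1 : Int) ≤ pvWrappedHeight line width := by
  unfold pvWrappedHeight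
  split
  · exact le_refl 1
  · exact le_max_left _ _

theorem pvS_length (hs : List Int) : pvS hs hs.length = 0 := by
  simp [pvS]

theorem pvS_step (hs : List Int) (k : Nat) (hk : k < hs.length) :
    pvS hs k = hs.getD k 0 + pvS hs (k+1) := by
  unfold pvS
  rw [List.drop_eq_getElem_cons hk, List.sum_cons, List.getD_eq_getElem hs 0 hk]

theorem pvS_anti (hs : List Int) (hpos : ∀ h ∈ hs, (1:Int) ≤ h) {i j : Nat} (hij : i ≤ j) :
    pvS hs j ≤ pvS hs i := by
  induction j, hij using Nat.le_induction with
  | base => exact le_refl _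
  | succ j hij ih =>
      refine le_trans ?_ ih
      by_cases hj : j < hs.length
      · rw [pvS_step hs j hj]
        have h1 : (1:Int) ≤ hs.getD j 0 := by
          rw [List.getD_eq_getElem hs 0 hj]
          exact hpos _ (List.getElem_mem hj)
        omega
      · unfold pvS
        rw [List.drop_of_length_le (by omega), List.drop_of_length_le (by omega)]

-- A's loop computes min m k when entered with acc = pvS hs k, start = k,
-- where m is the least index whose suffix height fits.
theorem pvAGo_eq (hs : List Int) (maxL : Int) (hpos : ∀ h ∈ hs, (1:Int) ≤ h)
    (m : Nat) (hPm : pvS hs m ≤ maxL) (hmin : ∀ j, j < m → ¬ pvS hs j ≤ maxL) :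
    ∀ k, k ≤ hs.length → pvAGo hs maxL k (pvS hs k) k = min m k := by
  intro k
  induction k with
  | zero => intro _; simp [pvAGo]
  | succ k ih =>
      intro hk
      have hklt : k < hs.length := by omega
      have hstep : pvS hs (k+1) + PySem.List.pyGetD hs (k : Int) 0 = pvS hs k := by
        rw [PySem.List.pyGetD_natCast, pvS_step hs k hklt]; ring
      unfold pvAGo
      rw [hstep]
      by_cases hgt : maxL < pvS hs k
      · rw [if_pos hgt]
        have hmk : k + 1 ≤ m := by
          by_contra hc
          have hmle : m ≤ k := by omega
          exact absurd (le_trans (pvS_anti hs hpos hmle) hPm) (by omega)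
        omega
      · rw [if_neg hgt]
        have hmle : m ≤ k := by
          by_contra hc
          exact hmin k (by omega) (by omega)
        have := ih (by omega)
        omega

-- B's loop from position s with remaining = pvS s reaches min (max s m) (len - 1).
theorem pvBGo_eq (lines : List (List Char)) (width maxL : Int)
    (m : Nat) (hPm : pvS (lines.map (fun l => pvHeightB l width)) m ≤ maxL)
    (hmin : ∀ j, j < m → ¬ pvS (lines.map (fun l => pvHeightB l width)) j ≤ maxL) :
    ∀ s, s ≤ lines.length - 1 →
      pvBGo lines width maxL s (pvS (lines.map (fun l => pvHeightB l width)) s)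
        = min (max s m) (lines.length - 1) := by
  set hs := lines.map (fun l => pvHeightB l width) with hhs
  have hpos : ∀ h ∈ hs, (1:Int) ≤ h := by
    intro h hh
    rw [hhs] at hh
    obtain ⟨l, _, rfl⟩ := List.mem_map.mp hh
    rw [pvHeightB_eq_pvWrappedHeight]
    exact pvWrappedHeight_pos l width
  intro s
  induction hs' : lines.length - 1 - s generalizing s with
  | zero =>
      intro hle
      rw [pvBGo]
      rw [dif_neg (by omega)]
      omega
  | succ d ih =>
      intro hle
      have hslt : s < lines.length - 1 := by omega
      have hsl : s < lines.length := by omega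
      have hsh : s < hs.length := by rw [hhs]; simpa using hsl
      rw [pvBGo]
      by_cases hgt : maxL < pvS hs s
      · rw [dif_pos ⟨by omega, hgt⟩]
        have h1 : PySem.List.pyGetD lines (s : Int) [] = lines[s] := by
          rw [PySem.List.pyGetD_natCast, List.getD_eq_getElem _ _ hsl]
        have h2 : hs.getD s 0 = pvHeightB lines[s] width := by
          rw [hhs, List.getD_eq_getElem?_getD, List.getElem?_map,
              List.getElem?_eq_getElem hsl]
          rfl
        have hrem : pvS hs s - pvHeightB (PySem.List.pyGetD lines (s : Int) []) width
            = pvS hs (s+1) := by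
          rw [h1, pvS_step hs s hsh, h2]; ring
        rw [hrem, ih (s+1) (by omega) (by omega)]
        have hms : s + 1 ≤ m := by
          by_contra hc
          have : m ≤ s := by omega
          exact absurd (le_trans (pvS_anti hs hpos this) hPm) (by omega)
        omega
      · rw [dif_neg (by tauto)]
        have hmle : m ≤ s := by
          by_contra hc
          exact hmin s (by omega) (by omega)
        omega

-- ===== VERDICT (by name: the statement is the Claim_ definition above) =====
theorem tail_content_py_spec : Claim_equal_tail_content_py := by
  intro content width max_lines _
  unfold Spec_tail_content_py tail_content_py tail_content_py_alt
  by_cases hg : content = "" ∨ max_lines ≤ 0 ∨ width ≤ 0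
  · rw [if_pos hg, if_pos hg]
  · rw [if_neg hg, if_neg hg]
    simp only [pvHeightB_eq_pvWrappedHeight]
    set raw_lines := PySem.Chars.splitOn content.toList ['\n'] with hraw
    set hs := raw_lines.map (fun l => pvWrappedHeight l width) with hhs
    by_cases ht : hs.sum ≤ max_lines
    · rw [if_pos ht, if_pos ht]
    · rw [if_neg ht, if_neg ht]
      have hpos : ∀ h ∈ hs, (1:Int) ≤ h := by
        intro h hh
        rw [hhs] at hh
        obtain ⟨l, _, rfl⟩ := List.mem_map.mp hh
        exact pvWrappedHeight_pos l width
      have hml : 0 < max_lines := by omega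
      -- least index whose suffix height fits
      have hex : ∃ k, pvS hs k ≤ max_lines := ⟨hs.length, by rw [pvS_length]; omega⟩
      set m := Nat.find hex with hm
      have hPm : pvS hs m ≤ max_lines := Nat.find_spec hex
      have hmin : ∀ j, j < m → ¬ pvS hs j ≤ max_lines := fun j hj => Nat.find_min hex hj
      have hmlen : m ≤ hs.length := Nat.find_min' hex (by rw [pvS_length]; omega)
      have hlen : hs.length = raw_lines.length := by rw [hhs]; simp
      -- A's start index
      have hS0 : pvS hs raw_lines.length = 0 := by rw [← hlen, pvS_length]
      have hA : pvAGo hs max_lines raw_lines.length 0 raw_lines.length = min m raw_lines.length := by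
        have := pvAGo_eq hs max_lines hpos m hPm hmin raw_lines.length (by omega)
        rw [hS0] at this
        exact this
      -- B's start index
      have hsum : hs.sum = pvS hs 0 := by rw [pvS]; simp
      have hB : pvBGo raw_lines width max_lines 0 hs.sum = min (max 0 m) (raw_lines.length - 1) := by
        have := pvBGo_eq raw_lines width max_lines m
          (by rw [← pvHeightB_eq_pvWrappedHeight] at hhs; rw [← hhs]; exact hPm)
          (by rw [← pvHeightB_eq_pvWrappedHeight] at hhs; rw [← hhs]; exact hmin)
          0 (by omega)
        rw [← pvHeightB_eq_pvWrappedHeight] at hhs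
        rw [← hhs] at this
        rw [hsum, this]
      simp only [hA, hB]
      have heq : (if raw_lines.length ≤ min m raw_lines.length then raw_lines.length - 1
          else min m raw_lines.length) = min (max 0 m) (raw_lines.length - 1) := by
        rw [hlen] at hmlen
        rw [Nat.zero_max]
        split_ifs with hcase
        · omega
        · omega
      rw [heq]
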